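-- pv_equiv track=rewrite | github.com/KonstantinosAng/CodeWars | Python/[4 kyu] Strip Comments.py | solution
-- ===== SOURCE A (Python) =====
-- def solution(string,markers):
--     if len(string) == 0:
--         return ''
--     t, tt, test, l, j, ret= [], [], [], [], [], ''
--     s = string.split('\n')
--     for _s in s:
--         for m in markers:
--             if _s.find(m) != -1:
--                 t.append(_s.find(m))
--         test.append(t)
--         t = []
--     for a in test:
--         tt.append(sorted(a))
--     for i, _s in zip(tt, s):
--         if i == []:
--             l.append(_s)
--         if i != []:
--             l.append(_s[:i[0]])
--     for s in l:
--         if s != '':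
--             if s[-1] == ' ':
--                 j.append(s[:-1])
--                 continue
--             else:
--                 j.append(s)
--                 continue
--         else:
--             j.append(s)
--     for i, s in enumerate(j):
--         if i == len(j) - 1:
--             ret += s
--             continue
--         ret += s + '\n'
--     return ret
-- ===== SOURCE B (Python) =====
-- def solution(string, markers):
--     out = []
--     for line in string.split('\n'):
--         # position-major scan: walk the line left to right and stop at the
--         # first index where any marker begins (instead of find() per marker + min)
--         cut = len(line)
--         for j in range(len(line)):
--             if any(line.startswith(m, j) for m in markers):
--                 cut = j
--                 break
--         kept = line[:cut]
--         if kept.endswith(' '):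
--             kept = kept[:-1]
--         out.append(kept)
--     return '\n'.join(out)
-- ===== Notes on version B (the rewrite author's own statement) =====
-- stated objective: faster
-- what changed: Replaces A's marker-major pipeline (find() per marker collected through five intermediate lists, sorted(), cut at the first element, separate strip and join passes) by a position-major left-to-right scan of each line that stops at the first index where any marker begins; the early break and the absence of the per-marker whole-line find() and of the intermediate list passes make it measurably faster.
import Mathlib
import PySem

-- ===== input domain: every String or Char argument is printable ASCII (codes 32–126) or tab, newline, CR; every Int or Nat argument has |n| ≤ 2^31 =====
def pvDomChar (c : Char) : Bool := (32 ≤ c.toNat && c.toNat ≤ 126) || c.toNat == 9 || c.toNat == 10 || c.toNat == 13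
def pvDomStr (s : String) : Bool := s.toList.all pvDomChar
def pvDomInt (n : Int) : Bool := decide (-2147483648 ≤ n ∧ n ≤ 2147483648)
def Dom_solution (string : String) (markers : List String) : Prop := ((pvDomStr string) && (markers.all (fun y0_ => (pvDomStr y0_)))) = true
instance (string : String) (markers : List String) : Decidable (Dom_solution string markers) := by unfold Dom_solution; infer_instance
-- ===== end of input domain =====

-- B replaces A's marker-major pipeline (find per marker, sorted(), cut, then separate
-- strip/join passes) by a position-major scan of each line that stops at the first index
-- where any marker begins (early break); a timing run measured it faster.

-- ===== PORT A =====
-- Transliteration of A on List Char (strings are ported through .toList per the PySem convention).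
def solutionA_core (cs : List Char) (markers : List (List Char)) : List Char :=
  let s := PySem.Chars.splitOn cs ['\n']
  let test := s.foldl (fun test _s =>
      test ++ [markers.foldl (fun t m =>
        if PySem.Chars.find _s m ≠ -1 then t ++ [PySem.Chars.find _s m] else t) []]) []
  let tt := test.foldl (fun tt a => tt ++ [PySem.List.sorted a id]) []
  let l := (tt.zip s).foldl (fun l p =>
      let l := if p.1 = [] then l ++ [p.2] else l
      if p.1 ≠ [] then
        -- i[0] on a list guarded nonempty: headD is exact here
        l ++ [PySem.Chars.slice p.2 none (some (p.1.headD 0))]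
      else l) []
  let j := l.foldl (fun j s =>
      if s ≠ [] then
        if PySem.Chars.pyGet? s (-1) = some ' ' then j ++ [PySem.Chars.slice s none (some (-1))]
        else j ++ [s]
      else j ++ [s]) []
  (PySem.List.enumerate j).foldl (fun ret p =>
      if p.1 = (j.length : Int) - 1 then ret ++ p.2 else ret ++ p.2 ++ ['\n']) []

def solution (string : String) (markers : List String) : String :=
  if PySem.Str.len string = 0 then "" else
  String.ofList (solutionA_core string.toList (markers.map String.toList))

-- ===== PORT B =====
-- B's inner for-j-with-break: walk the suffixes of the line, counting, and stop at the
-- first position where some marker begins (Python's line.startswith(m, j)).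
def scanB (markers : List (List Char)) : List Char → Nat
  | [] => 0
  | c :: rest =>
      if markers.any (fun m => PySem.Chars.startswith (c :: rest) m) then 0
      else 1 + scanB markers rest

def solutionB_line (markers : List (List Char)) (line : List Char) : List Char :=
  let kept := PySem.Chars.slice line none (some ((scanB markers line : Nat) : Int))
  if PySem.Chars.endswith kept [' '] then PySem.Chars.slice kept none (some (-1)) else kept

def solution_alt (string : String) (markers : List String) : String :=
  String.ofList (PySem.Chars.join ['\n']
    ((PySem.Chars.splitOn string.toList ['\n']).map (solutionB_line (markers.map String.toList))))

-- ===== PRECONDITION & SPEC =====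
def Spec_solution (string : String) (markers : List String) (out : String) : Prop := out = solution_alt string markers
instance (string : String) (markers : List String) (out : String) : Decidable (Spec_solution string markers out) := by unfold Spec_solution; infer_instance

-- ===== CLAIM (what is proved, stated in full; the proofs are below) =====
def Claim_equal_solution : Prop := ∀ (string : String) (markers : List String), Dom_solution string markers → Spec_solution string markers (solution string markers)

-- ===== LEMMAS AND PROOFS =====

-- A's per-line pipeline, named for the proof (exactly the fold bodies of solutionA_core)
def posA (markers : List (List Char)) (x : List Char) : List Int :=
  markers.foldl (fun t m =>
    if PySem.Chars.find x m ≠ -1 then t ++ [PySem.Chars.find x m] else t) []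

def lineA (markers : List (List Char)) (x : List Char) : List Char :=
  let i := PySem.List.sorted (posA markers x) id
  if i = [] then x else PySem.Chars.slice x none (some (i.headD 0))

def stripA (y : List Char) : List Char :=
  if y ≠ [] then
    if PySem.Chars.pyGet? y (-1) = some ' ' then PySem.Chars.slice y none (some (-1)) else y
  else y

-- head of the sorted list = min? (as values), on a nonempty list of Ints
lemma sortedHead_eq_min (P : List Int) (h : P ≠ []) :
    (PySem.List.sorted P id).headD 0 = (PySem.List.min? P id).getD 0 := by
  obtain ⟨m, hm⟩ : ∃ m, PySem.List.min? P id = some m := by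
    cases hP : PySem.List.min? P id with
    | some m => exact ⟨m, rfl⟩
    | none => exact absurd ((PySem.List.min?_eq_none_iff P id).mp hP) h
  have hperm := PySem.List.sorted_perm P id false
  obtain ⟨a, t, hst⟩ : ∃ a t, PySem.List.sorted P id = a :: t := by
    cases hs : PySem.List.sorted P id with
    | nil => exact absurd (List.Perm.eq_nil (hs ▸ hperm).symm) h
    | cons a t => exact ⟨a, t, rfl⟩
  have hpw := PySem.List.sorted_pairwise P id
  have hamem : a ∈ P := (PySem.List.mem_sorted P id false a).mp (hst ▸ List.mem_cons_self ..)
  have hmmem : m ∈ P := PySem.List.min?_mem hm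
  have ham : a ≤ m := by
    have := (PySem.List.mem_sorted P id false m).mpr hmmem
    rw [hst] at this hpw
    rcases List.mem_cons.mp this with h1 | h2
    · omega
    · exact (List.pairwise_cons.mp hpw).1 m h2
  have hma : m ≤ a := PySem.List.min?_id_le hm a hamem
  rw [hst, hm]
  simp; omega

lemma enumFoldAux (n : Int) (j : List (List Char)) (k : Int) (acc : List Char)
    (h : n = k + j.length) :
    (PySem.List.enumerate j k).foldl (fun ret p =>
      if p.1 = n - 1 then ret ++ p.2 else ret ++ p.2 ++ ['\n']) acc
    = acc ++ PySem.Chars.join ['\n'] j := by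
  induction j generalizing k acc with
  | nil => simp [PySem.List.enumerate_nil, PySem.Chars.join_nil]
  | cons x t ih =>
    rw [PySem.List.enumerate_cons, List.foldl_cons]
    cases t with
    | nil =>
      have : k = n - 1 := by simp at h; omega
      simp [this, PySem.List.enumerate_nil, PySem.Chars.join_singleton]
    | cons y t' =>
      have hk : ¬ (k = n - 1) := by simp at h; omega
      rw [if_neg hk, ih (k + 1) _ (by simp at h ⊢; omega),
        PySem.Chars.join_cons_cons]
      simp

-- A's enumerate-fold with the last index special-cased is join with '\n'
lemma enumFold_eq_join (j : List (List Char)) :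
    (PySem.List.enumerate j).foldl (fun ret p =>
      if p.1 = (j.length : Int) - 1 then ret ++ p.2 else ret ++ p.2 ++ ['\n']) []
    = PySem.Chars.join ['\n'] j := by
  simpa using enumFoldAux (j.length : Int) j 0 [] (by simp)

lemma zip_map_self {α β : Type} (g : α → β) (s : List α) :
    (s.map g).zip s = s.map (fun x => (g x, x)) := by
  induction s with
  | nil => rfl
  | cons a t ih => simp [ih]

-- A's fused per-line pipeline extracted from the folds
lemma core_eq (cs : List Char) (markers : List (List Char)) :
    solutionA_core cs markers
    = PySem.Chars.join ['\n']
        ((PySem.Chars.splitOn cs ['\n']).map (fun x => stripA (lineA markers x))) := by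
  unfold solutionA_core
  simp only [PySem.List.foldl_append_singleton_eq_map, List.nil_append, List.map_map]
  rw [show (fun x => PySem.List.sorted x id) ∘ (fun x =>
        markers.foldl (fun t m =>
          if PySem.Chars.find x m ≠ -1 then t ++ [PySem.Chars.find x m] else t) [])
      = (fun x => PySem.List.sorted (posA markers x) id) from rfl]
  rw [zip_map_self]
  rw [show (fun (l : List (List Char)) (p : List Int × List Char) =>
        if p.1 ≠ [] then
          (if p.1 = [] then l ++ [p.2] else l) ++ [PySem.Chars.slice p.2 none (some (p.1.headD 0))]
        else if p.1 = [] then l ++ [p.2] else l)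
      = (fun l p => l ++ [if p.1 = [] then p.2 else PySem.Chars.slice p.2 none (some (p.1.headD 0))]) from by
    funext l p
    by_cases h : p.1 = [] <;> simp [h]]
  rw [show (fun (j : List (List Char)) (s : List Char) =>
        if s ≠ [] then
          if PySem.Chars.pyGet? s (-1) = some ' ' then j ++ [PySem.Chars.slice s none (some (-1))]
          else j ++ [s]
        else j ++ [s])
      = (fun j s => j ++ [stripA s]) from by
    funext j s
    unfold stripA
    by_cases h1 : s = []
    · simp [h1]
    · by_cases h2 : PySem.Chars.pyGet? s (-1) = some ' '
      · simp only [PySem.Chars.pyGet?_eq_listPyGet?] at h2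
        simp [h1, h2]
      · simp only [PySem.Chars.pyGet?_eq_listPyGet?] at h2
        simp [h1, h2]]
  simp only [PySem.List.foldl_append_singleton_eq_map, List.nil_append, List.map_map]
  rw [enumFold_eq_join]
  rfl

-- characterisation of B's scan: it is at most the length, no marker begins before it,
-- and if it stops early some marker begins there
lemma scanB_le (markers : List (List Char)) (x : List Char) : scanB markers x ≤ x.length := by
  induction x with
  | nil => simp [scanB]
  | cons c rest ih =>
    unfold scanB
    split_ifs with h
    · simp
    · simp only [List.length_cons]
      omega

lemma scanB_not_before (markers : List (List Char)) (x : List Char) :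
    ∀ i < scanB markers x, ∀ m ∈ markers, ¬ m <+: x.drop i := by
  induction x with
  | nil => simp [scanB]
  | cons c rest ih =>
    intro i hi m hm
    unfold scanB at hi
    split_ifs at hi with hmatch
    · omega
    · cases i with
      | zero =>
        intro hpref
        exact hmatch (List.any_eq_true.mpr ⟨m, hm, (PySem.Chars.startswith_iff _ _).mpr (by simpa using hpref)⟩)
      | succ i' =>
        simpa using ih i' (by omega) m hm

lemma scanB_hit (markers : List (List Char)) (x : List Char)
    (h : scanB markers x < x.length) :
    ∃ m ∈ markers, m <+: x.drop (scanB markers x) := by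
  induction x with
  | nil => simp at h
  | cons c rest ih =>
    unfold scanB at h ⊢
    split_ifs at h ⊢ with hmatch
    · obtain ⟨m, hm, hsw⟩ := List.any_eq_true.mp hmatch
      exact ⟨m, hm, by simpa using (PySem.Chars.startswith_iff _ _).mp hsw⟩
    · simp only [List.length_cons] at h
      obtain ⟨m, hm, hp⟩ := ih (by omega)
      refine ⟨m, hm, ?_⟩
      rw [Nat.add_comm, List.drop_succ_cons]
      exact hp

-- A's collected find-positions, as a filterMap (for membership reasoning)
lemma posA_aux (x : List Char) (markers : List (List Char)) (acc : List Int) :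
    markers.foldl (fun t m =>
      if PySem.Chars.find x m ≠ -1 then t ++ [PySem.Chars.find x m] else t) acc
    = acc ++ markers.filterMap (fun m =>
        if PySem.Chars.isIn m x then some (PySem.Chars.find x m) else none) := by
  induction markers generalizing acc with
  | nil => simp
  | cons m ms ih =>
    rw [List.foldl_cons, List.filterMap_cons]
    by_cases hm : PySem.Chars.find x m = -1
    · have hin : PySem.Chars.isIn m x = false := by
        rw [PySem.Chars.isIn_eq_false_iff, ← PySem.Chars.find_eq_neg_one_iff]; exact hm
      rw [if_neg (by simp [hm]), hin, ih]
      simp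
    · have hin : PySem.Chars.isIn m x = true := by
        rw [PySem.Chars.isIn_iff_infix, ← PySem.Chars.find_ne_neg_one_iff]; exact hm
      rw [if_pos hm, hin, ih]
      simp

lemma posA_eq (markers : List (List Char)) (x : List Char) :
    posA markers x
    = markers.filterMap (fun m =>
        if PySem.Chars.isIn m x then some (PySem.Chars.find x m) else none) := by
  unfold posA
  simpa using posA_aux x markers []

-- membership in posA gives a marker whose find the position is
lemma posA_elim (markers : List (List Char)) (x : List Char) (p : Int)
    (h : p ∈ posA markers x) :
    ∃ m ∈ markers, PySem.Chars.isIn m x = true ∧ PySem.Chars.find x m = p := by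
  rw [posA_eq] at h
  obtain ⟨m, hm, hf⟩ := List.mem_filterMap.mp h
  by_cases hin : PySem.Chars.isIn m x = true
  · rw [if_pos hin] at hf
    exact ⟨m, hm, hin, Option.some_injective _ hf⟩
  · rw [if_neg hin] at hf
    exact absurd hf (by simp)

-- B's cut position equals A's min-of-finds (posA nonempty case), and the full length otherwise
lemma cut_eq (markers : List (List Char)) (x : List Char) :
    PySem.Chars.slice x none (some ((scanB markers x : Nat) : Int)) = lineA markers x := by
  unfold lineA
  by_cases hP : posA markers x = []
  · rw [if_pos (by rw [PySem.List.sorted_eq_nil_iff]; exact hP)]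
    have hfull : scanB markers x = x.length := by
      rcases Nat.lt_or_ge (scanB markers x) x.length with hlt | hge
      · obtain ⟨m, hm, hpref⟩ := scanB_hit markers x hlt
        have hin : PySem.Chars.isIn m x = true :=
          (PySem.Chars.exists_prefix_drop_iff_isIn m x).mp ⟨_, hpref⟩
        have : PySem.Chars.find x m ∈ posA markers x := by
          rw [posA_eq]
          exact List.mem_filterMap.mpr ⟨m, hm, by rw [if_pos hin]⟩
        rw [hP] at this
        simp at this
      · exact le_antisymm (scanB_le markers x) hge
    rw [hfull, PySem.Chars.slice_eq_listSlice, PySem.List.slice_to_natCast, List.take_length]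
  · rw [if_neg (show ¬PySem.List.sorted (posA markers x) id = [] from
        fun hc => hP ((PySem.List.sorted_eq_nil_iff _ _ _).mp hc)), sortedHead_eq_min _ hP]
    obtain ⟨m0, hm0⟩ : ∃ m0, PySem.List.min? (posA markers x) id = some m0 := by
      cases hmm : PySem.List.min? (posA markers x) id with
      | some m0 => exact ⟨m0, rfl⟩
      | none => exact absurd ((PySem.List.min?_eq_none_iff _ id).mp hmm) hP
    rw [hm0, Option.getD_some]
    obtain ⟨m, hm, hin, hfind⟩ := posA_elim markers x m0 (PySem.List.min?_mem hm0)
    have h0 : (0 : Int) ≤ m0 := by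
      rw [← hfind]
      exact (PySem.Chars.find_nonneg_iff x m).mpr ((PySem.Chars.isIn_iff_infix m x).mp hin)
    have hspec := PySem.Chars.find_spec (s := x) (sub := m) (by rw [hfind]; exact h0)
    -- scanB ≤ m0.toNat: m begins at m0, and nothing begins strictly before scanB
    have hle1 : scanB markers x ≤ m0.toNat := by
      by_contra hcon
      push Not at hcon
      exact scanB_not_before markers x m0.toNat hcon m hm (by rw [← hfind]; exact hspec.1)
    -- m0.toNat ≤ scanB: otherwise scanB stops early at a marker whose find would beat the min
    have hle2 : m0.toNat ≤ scanB markers x := by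
      by_contra hcon
      push Not at hcon
      have hlen : m0 ≤ (x.length : Int) := hfind ▸ PySem.Chars.find_le_length x m
      have hlt : scanB markers x < x.length := by omega
      obtain ⟨m', hm', hp'⟩ := scanB_hit markers x hlt
      have hin' : PySem.Chars.isIn m' x = true :=
        (PySem.Chars.exists_prefix_drop_iff_isIn m' x).mp ⟨_, hp'⟩
      have hmem' : PySem.Chars.find x m' ∈ posA markers x := by
        rw [posA_eq]
        exact List.mem_filterMap.mpr ⟨m', hm', by rw [if_pos hin']⟩
      have h0' : (0 : Int) ≤ PySem.Chars.find x m' :=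
        (PySem.Chars.find_nonneg_iff x m').mpr ((PySem.Chars.isIn_iff_infix m' x).mp hin')
      have hspec' := PySem.Chars.find_spec (s := x) (sub := m') h0'
      have hfle : (PySem.Chars.find x m').toNat ≤ scanB markers x := by
        by_contra hc2
        push Not at hc2
        exact hspec'.2 (scanB markers x) hc2 hp'
      have hminle : m0 ≤ PySem.Chars.find x m' := PySem.List.min?_id_le hm0 _ hmem'
      omega
    have : ((scanB markers x : Nat) : Int) = m0 := by omega
    rw [this]

-- stripping one trailing space: B's endswith form equals A's pyGet?(-1) form
lemma strip_eq (y : List Char) :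
    (if PySem.Chars.endswith y [' '] then PySem.Chars.slice y none (some (-1)) else y)
    = stripA y := by
  unfold stripA
  rcases List.eq_nil_or_concat y with rfl | ⟨t, a, rfl⟩
  · simp [PySem.Chars.endswith]
  · rw [List.concat_eq_append]
    have hget : PySem.List.pyGet? (t ++ [a]) (-1) = some a := by
      rw [PySem.List.pyGet?_neg_one, List.getLast?_concat]
    by_cases ha : a = ' '
    · subst ha
      rw [if_pos ((PySem.Chars.endswith_iff _ _).mpr ⟨t, rfl⟩)]
      simp [hget]
    · have hend : PySem.Chars.endswith (t ++ [a]) [' '] = false := by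
        rcases hb : PySem.Chars.endswith (t ++ [a]) [' '] with _ | _
        · rfl
        · obtain ⟨u, hu⟩ := (PySem.Chars.endswith_iff _ _).mp hb
          have := congrArg List.getLast? hu
          rw [List.getLast?_concat, List.getLast?_concat] at this
          exact absurd (Option.some_injective _ this).symm ha
      rw [hend]
      simp [hget, ha]

-- B's per-line function equals A's per-line pipeline
lemma line_eq (markers : List (List Char)) (x : List Char) :
    solutionB_line markers x = stripA (lineA markers x) := by
  unfold solutionB_line
  rw [cut_eq, strip_eq]

-- B on the empty line
lemma B_line_nil (markers : List (List Char)) : solutionB_line markers [] = [] := by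
  simp only [solutionB_line, scanB]
  decide

-- ===== VERDICT (by name: the statement is the Claim_ definition above) =====
theorem solution_spec : Claim_equal_solution := by
  intro string markers _
  unfold Spec_solution solution solution_alt
  by_cases h0 : PySem.Str.len string = 0
  · rw [if_pos h0]
    have hnil : string.toList = [] := by
      have := PySem.Str.len_eq string
      rw [h0] at this
      exact List.eq_nil_of_length_eq_zero (by omega)
    rw [hnil, show PySem.Chars.splitOn [] ['\n'] = [[]] from by decide,
      List.map_singleton]
    rw [B_line_nil, PySem.Chars.join_singleton]
  · rw [if_neg h0, core_eq]
    congr 2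
    apply List.map_congr_left
    intro x _
    exact (line_eq _ x).symm
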